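-- pv_equiv track=rewrite | github.com/Spiceman161/fqdn-updater | src/fqdn_updater/cli/panel.py | _effective_service_selection
-- ===== SOURCE A (Python) =====
-- from collections.abc import Iterable
--
-- SERVICE_SELECTION_GROUPS = {
--     "block": (
--         "block_p2p_streaming",
--         "block_vpn_proxy_privacy",
--         "block_dev_hosting_security",
--         "block_finance_shopping",
--         "block_social_creators",
--         "block_news_politics",
--         "block_other",
--     ),
--     "geoblock": (
--         "geoblock_ai",
--         "geoblock_dev_cloud_saas",
--         "geoblock_media_games",
--         "geoblock_shopping_travel",
--         "geoblock_enterprise_hardware",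
--         "geoblock_security_networking",
--         "geoblock_finance_payments",
--         "geoblock_health_reference",
--         "geoblock_other",
--     ),
--     "hodca": (
--         "hodca_dev_cloud_saas",
--         "hodca_network_os_tools",
--         "hodca_media_games",
--         "hodca_ai_education_research",
--         "hodca_social_lifestyle",
--         "hodca_finance_shopping",
--         "hodca_other",
--     ),
-- }
--
-- def _effective_service_selection(selected_values: Iterable[str]) -> set[str]:
--     selected = set(selected_values)
--     for parent, children in SERVICE_SELECTION_GROUPS.items():
--         child_set = set(children)
--         if parent in selected:
--             selected.difference_update(child_set)
--         elif child_set.issubset(selected):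
--             selected.difference_update(child_set)
--             selected.add(parent)
--     return selected
-- ===== SOURCE B (Python) =====
-- from collections.abc import Iterable
--
-- SERVICE_SELECTION_GROUPS = {
--     "block": (
--         "block_p2p_streaming",
--         "block_vpn_proxy_privacy",
--         "block_dev_hosting_security",
--         "block_finance_shopping",
--         "block_social_creators",
--         "block_news_politics",
--         "block_other",
--     ),
--     "geoblock": (
--         "geoblock_ai",
--         "geoblock_dev_cloud_saas",
--         "geoblock_media_games",
--         "geoblock_shopping_travel",
--         "geoblock_enterprise_hardware",
--         "geoblock_security_networking",
--         "geoblock_finance_payments",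
--         "geoblock_health_reference",
--         "geoblock_other",
--     ),
--     "hodca": (
--         "hodca_dev_cloud_saas",
--         "hodca_network_os_tools",
--         "hodca_media_games",
--         "hodca_ai_education_research",
--         "hodca_social_lifestyle",
--         "hodca_finance_shopping",
--         "hodca_other",
--     ),
-- }
--
-- # Reverse index: each child service string -> its parent group key.
-- CHILD_TO_PARENT = {
--     child: parent
--     for parent, children in SERVICE_SELECTION_GROUPS.items()
--     for child in children
-- }
--
-- def _effective_service_selection(selected_values: Iterable[str]) -> set[str]:
--     selected = set(selected_values)
--     collapsed = {
--         parent
--         for parent, children in SERVICE_SELECTION_GROUPS.items()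
--         if parent in selected or selected.issuperset(children)
--     }
--     kept = {x for x in selected if CHILD_TO_PARENT.get(x) not in collapsed}
--     return kept | collapsed
-- ===== Notes on version B (the rewrite author's own statement) =====
-- stated objective: alternative
-- what changed: Instead of iterating the three groups and mutating the selection set with issubset/difference_update, B precomputes a reverse CHILD_TO_PARENT index, determines the collapsed parent groups in one comprehension over the groups, and builds the result with a single filter pass over the selection unioned with the collapsed parents.
import Mathlib
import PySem

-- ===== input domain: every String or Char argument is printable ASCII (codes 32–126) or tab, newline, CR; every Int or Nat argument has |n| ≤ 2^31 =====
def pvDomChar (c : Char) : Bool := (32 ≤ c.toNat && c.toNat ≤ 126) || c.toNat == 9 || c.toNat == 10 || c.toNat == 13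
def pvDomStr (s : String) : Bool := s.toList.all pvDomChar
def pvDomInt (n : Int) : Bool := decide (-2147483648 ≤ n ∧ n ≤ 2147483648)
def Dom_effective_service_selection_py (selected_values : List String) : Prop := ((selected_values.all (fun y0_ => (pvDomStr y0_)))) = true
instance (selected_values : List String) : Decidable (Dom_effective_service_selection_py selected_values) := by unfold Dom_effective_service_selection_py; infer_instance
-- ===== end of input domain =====

-- B replaces A's three issubset/difference_update passes over the evolving set by a
-- precomputed child→parent index and a single filter pass over the selection (objective: alternative).

-- SERVICE_SELECTION_GROUPS (module constant, insertion order)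
def pvGroups : List (String × List String) :=
  [("block",
     ["block_p2p_streaming", "block_vpn_proxy_privacy", "block_dev_hosting_security",
      "block_finance_shopping", "block_social_creators", "block_news_politics", "block_other"]),
   ("geoblock",
     ["geoblock_ai", "geoblock_dev_cloud_saas", "geoblock_media_games",
      "geoblock_shopping_travel", "geoblock_enterprise_hardware", "geoblock_security_networking",
      "geoblock_finance_payments", "geoblock_health_reference", "geoblock_other"]),
   ("hodca",
     ["hodca_dev_cloud_saas", "hodca_network_os_tools", "hodca_media_games",
      "hodca_ai_education_research", "hodca_social_lifestyle", "hodca_finance_shopping",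
      "hodca_other"])]

-- ===== PORT A =====
def effective_service_selection_py (selected_values : List String) : List String :=
  pvGroups.foldl
    (fun selected pc =>
      let childSet : PySem.Set String := PySem.Set.ofList pc.2
      if PySem.Set.contains selected pc.1 = true then
        PySem.Set.diff selected childSet
      else if PySem.Set.issubset childSet selected = true then
        PySem.Set.add (PySem.Set.diff selected childSet) pc.1
      else selected)
    (PySem.Set.ofList selected_values)

-- ===== PORT B =====
-- CHILD_TO_PARENT = {child: parent for parent, children in SERVICE_SELECTION_GROUPS.items() for child in children}
def pvChildToParent : PySem.Dict String String :=
  pvGroups.foldl (fun d pc => pc.2.foldl (fun d c => PySem.Dict.insert d c pc.1) d) PySem.Dict.empty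

def effective_service_selection_py_alt (selected_values : List String) : List String :=
  let selected : PySem.Set String := PySem.Set.ofList selected_values
  let collapsed : PySem.Set String :=
    PySem.Set.ofList
      ((pvGroups.filter
          (fun pc => PySem.Set.contains selected pc.1 || PySem.Set.issuperset selected pc.2)).map
        (fun pc => pc.1))
  -- 'CHILD_TO_PARENT.get(x) not in collapsed' (None is never a member)
  let kept : PySem.Set String :=
    PySem.Set.ofList
      (selected.filter (fun x =>
        !((PySem.Dict.get? pvChildToParent x).any (fun p => PySem.Set.contains collapsed p))))
  PySem.Set.union kept collapsed

-- ===== PRECONDITION & SPEC =====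
def Spec_effective_service_selection_py (selected_values : List String) (out : List String) : Prop := out = effective_service_selection_py_alt selected_values
instance (selected_values : List String) (out : List String) : Decidable (Spec_effective_service_selection_py selected_values out) := by unfold Spec_effective_service_selection_py; infer_instance

-- ===== CLAIM (what is proved, stated in full; the proofs are below) =====
def Claim_equal_effective_service_selection_py : Prop := ∀ (selected_values : List String), Dom_effective_service_selection_py selected_values → Spec_effective_service_selection_py selected_values (effective_service_selection_py selected_values)

-- ===== LEMMAS AND PROOFS =====

-- parent/children shorthands
def pvP1 : String := "block"
def pvP2 : String := "geoblock"
def pvP3 : String := "hodca"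
def pvC1 : List String :=
  ["block_p2p_streaming", "block_vpn_proxy_privacy", "block_dev_hosting_security",
   "block_finance_shopping", "block_social_creators", "block_news_politics", "block_other"]
def pvC2 : List String :=
  ["geoblock_ai", "geoblock_dev_cloud_saas", "geoblock_media_games",
   "geoblock_shopping_travel", "geoblock_enterprise_hardware", "geoblock_security_networking",
   "geoblock_finance_payments", "geoblock_health_reference", "geoblock_other"]
def pvC3 : List String :=
  ["hodca_dev_cloud_saas", "hodca_network_os_tools", "hodca_media_games",
   "hodca_ai_education_research", "hodca_social_lifestyle", "hodca_finance_shopping",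
   "hodca_other"]

-- group condition evaluated on the original selection
def pvB (S : List String) (p : String) (C : List String) : Bool :=
  S.contains p || C.all (fun c => S.contains c)

lemma pv_contains_eq (l : List String) (x : String) : l.contains x = decide (x ∈ l) := by
  by_cases h : x ∈ l <;> simp [h]

lemma pv_set_contains_eq (s : List String) (x : String) :
    PySem.Set.contains s x = s.contains x := rfl

-- A's loop body as a named step
def pvStep (S : List String) (p : String) (C : List String) : List String :=
  let childSet : PySem.Set String := PySem.Set.ofList C
  if PySem.Set.contains S p = true then PySem.Set.diff S childSet
  else if PySem.Set.issubset childSet S = true then PySem.Set.add (PySem.Set.diff S childSet) p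
  else S

lemma pvA_eq (sv : List String) :
    effective_service_selection_py sv =
      pvStep (pvStep (pvStep (PySem.Set.ofList sv) pvP1 pvC1) pvP2 pvC2) pvP3 pvC3 := by
  rfl

-- the parent appended by one step of A (empty unless the group collapses freshly)
def pvE (S : List String) (p : String) (C : List String) : List String :=
  if pvB S p C && !S.contains p then [p] else []

lemma pvE_mem (S : List String) (p C e) (h : e ∈ pvE S p C) : e = p := by
  unfold pvE at h; split at h <;> simp_all

-- characterization of one step of A on a state of the canonical shape
lemma pvStep_char (S0 E : List String) (f : String → Bool) (p : String) (C : List String)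
    (hCf : ∀ x ∈ C, f x = true) (hpf : f p = true) (hpC : p ∉ C)
    (hEC : ∀ e ∈ E, e ∉ C) (hEp : p ∉ E) :
    pvStep (S0.filter f ++ E) p C =
      S0.filter (fun x => f x && !(pvB S0 p C && C.contains x)) ++ E ++ pvE S0 p C := by
  have hofc : ∀ x, (PySem.Set.ofList C).contains x = C.contains x := by
    intro x; simp only [pv_contains_eq]; simp [PySem.Set.mem_ofList]
  have hconts : (S0.filter f ++ E).contains p = S0.contains p := by
    simp only [pv_contains_eq]
    by_cases h : p ∈ S0 <;> simp [List.mem_append, List.mem_filter, hpf, hEp, h]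
  have hdiff : PySem.Set.diff (S0.filter f ++ E) (PySem.Set.ofList C) =
      S0.filter (fun x => f x && !C.contains x) ++ E := by
    show (S0.filter f ++ E).filter (fun x => !(PySem.Set.contains (PySem.Set.ofList C) x)) = _
    simp only [pv_set_contains_eq, hofc]
    rw [List.filter_append, List.filter_filter]
    congr 1
    · exact List.filter_congr (fun x _ => Bool.and_comm _ _)
    · rw [List.filter_eq_self]
      intro e he
      simp [pv_contains_eq, hEC e he]
  have hss : PySem.Set.issubset (PySem.Set.ofList C) (S0.filter f ++ E) =
      C.all (fun c => S0.contains c) := by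
    rw [Bool.eq_iff_iff, PySem.Set.issubset_iff]
    simp only [List.all_eq_true, pv_contains_eq, decide_eq_true_eq]
    constructor
    · intro h x hx
      have hx' : x ∈ PySem.Set.ofList C := by simpa using hx
      rcases List.mem_append.mp (h x hx') with hm | hm
      · exact (List.mem_filter.mp hm).1
      · exact absurd hx (hEC x hm)
    · intro h x hx
      have hx' : x ∈ C := by simpa using hx
      exact List.mem_append.mpr (Or.inl (List.mem_filter.mpr ⟨h x hx', hCf x hx'⟩))
  by_cases h1 : p ∈ S0
  · have hb : pvB S0 p C = true := by simp [pvB, pv_contains_eq, h1]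
    have hc1 : PySem.Set.contains (S0.filter f ++ E) p = true := by
      rw [pv_set_contains_eq, hconts]; simp [pv_contains_eq, h1]
    unfold pvStep
    rw [if_pos hc1, hdiff, hb]
    have he : (fun x => f x && !(true && C.contains x)) = (fun x => f x && !C.contains x) := by
      funext x; simp
    rw [he]
    have hE0 : pvE S0 p C = [] := by simp [pvE, pv_contains_eq, h1]
    simp [hE0]
  · have hcf : S0.contains p = false := by simp [pv_contains_eq, h1]
    by_cases h2 : (C.all fun c => S0.contains c) = true
    · have hb : pvB S0 p C = true := by unfold pvB; rw [h2]; simp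
      have hc1 : ¬ PySem.Set.contains (S0.filter f ++ E) p = true := by
        rw [pv_set_contains_eq, hconts, hcf]; simp
      unfold pvStep
      rw [if_neg hc1, if_pos (by rw [hss]; exact h2), hdiff, hb]
      have hpn : p ∉ S0.filter (fun x => f x && !C.contains x) ++ E := by
        intro hm
        rcases List.mem_append.mp hm with hm | hm
        · exact h1 (List.mem_filter.mp hm).1
        · exact hEp hm
      rw [PySem.Set.add_of_not_mem hpn]
      have hE1 : pvE S0 p C = [p] := by simp [pvE, hb, h1]
      simp [hE1]
    · have hall : (C.all fun c => S0.contains c) = false := by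
        rcases Bool.eq_false_or_eq_true (C.all fun c => S0.contains c) with h | h
        · exact absurd h h2
        · exact h
      have hb : pvB S0 p C = false := by unfold pvB; rw [hall, hcf]; rfl
      have hc1 : ¬ PySem.Set.contains (S0.filter f ++ E) p = true := by
        rw [pv_set_contains_eq, hconts, hcf]; simp
      unfold pvStep
      rw [if_neg hc1, if_neg (by rw [hss]; exact h2), hb]
      have hE0 : pvE S0 p C = [] := by simp [pvE, hb]
      simp [hE0]

-- decidable facts about the constant groups
lemma pv_nin_c1_c2 : ∀ x ∈ pvC1, x ∉ pvC2 := by decide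
lemma pv_nin_c1_c3 : ∀ x ∈ pvC1, x ∉ pvC3 := by decide
lemma pv_nin_c2_c1 : ∀ x ∈ pvC2, x ∉ pvC1 := by decide
lemma pv_nin_c2_c3 : ∀ x ∈ pvC2, x ∉ pvC3 := by decide
lemma pv_nin_c3_c1 : ∀ x ∈ pvC3, x ∉ pvC1 := by decide
lemma pv_nin_c3_c2 : ∀ x ∈ pvC3, x ∉ pvC2 := by decide

-- the keep-predicate both sides filter the original selection with
def pvKeep (S : List String) (x : String) : Bool :=
  !(pvB S pvP1 pvC1 && pvC1.contains x) &&
    (!(pvB S pvP2 pvC2 && pvC2.contains x) && !(pvB S pvP3 pvC3 && pvC3.contains x))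

lemma pv_bool3 (a b c d e g : Bool) :
    ((((true && !(a && b)) && !(c && d)) && !(e && g)) =
      (!(a && b) && (!(c && d) && !(e && g)))) := by
  cases a <;> cases b <;> cases c <;> cases d <;> cases e <;> cases g <;> rfl

-- A in canonical form
lemma pvA_char (sv : List String) :
    effective_service_selection_py sv =
      (PySem.Set.ofList sv).filter (pvKeep (PySem.Set.ofList sv)) ++
        (pvE (PySem.Set.ofList sv) pvP1 pvC1 ++
          (pvE (PySem.Set.ofList sv) pvP2 pvC2 ++ pvE (PySem.Set.ofList sv) pvP3 pvC3)) := by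
  rw [pvA_eq]
  set S0 := PySem.Set.ofList sv with hS0
  have s1 : pvStep S0 pvP1 pvC1 =
      S0.filter (fun x => true && !(pvB S0 pvP1 pvC1 && pvC1.contains x)) ++
        ([] ++ pvE S0 pvP1 pvC1) := by
    have h := pvStep_char S0 [] (fun _ => true) pvP1 pvC1
      (by intro x _; rfl) rfl (by decide) (by intro e he; simp at he) (by simp)
    simpa using h
  have s2 : pvStep (pvStep S0 pvP1 pvC1) pvP2 pvC2 =
      S0.filter (fun x => (true && !(pvB S0 pvP1 pvC1 && pvC1.contains x)) &&
          !(pvB S0 pvP2 pvC2 && pvC2.contains x)) ++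
        (pvE S0 pvP1 pvC1 ++ pvE S0 pvP2 pvC2) := by
    rw [s1]
    have h := pvStep_char S0 (pvE S0 pvP1 pvC1)
      (fun x => true && !(pvB S0 pvP1 pvC1 && pvC1.contains x)) pvP2 pvC2
      (by intro x hx; simp [pv_nin_c2_c1 x hx])
      (by simp [show pvP2 ∉ pvC1 from by decide])
      (by decide)
      (by intro e he; rw [pvE_mem S0 pvP1 pvC1 e he]; decide)
      (by intro he; exact absurd (pvE_mem S0 pvP1 pvC1 pvP2 he) (by decide))
    simp only [List.nil_append] at h ⊢
    rw [h]
    simp only [List.append_assoc]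
  have s3 : pvStep (pvStep (pvStep S0 pvP1 pvC1) pvP2 pvC2) pvP3 pvC3 =
      S0.filter (fun x => ((true && !(pvB S0 pvP1 pvC1 && pvC1.contains x)) &&
          !(pvB S0 pvP2 pvC2 && pvC2.contains x)) && !(pvB S0 pvP3 pvC3 && pvC3.contains x)) ++
        (pvE S0 pvP1 pvC1 ++ (pvE S0 pvP2 pvC2 ++ pvE S0 pvP3 pvC3)) := by
    rw [s2]
    have h := pvStep_char S0 (pvE S0 pvP1 pvC1 ++ pvE S0 pvP2 pvC2)
      (fun x => (true && !(pvB S0 pvP1 pvC1 && pvC1.contains x)) &&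
        !(pvB S0 pvP2 pvC2 && pvC2.contains x)) pvP3 pvC3
      (by intro x hx; simp [pv_nin_c3_c1 x hx, pv_nin_c3_c2 x hx])
      (by simp [show pvP3 ∉ pvC1 from by decide, show pvP3 ∉ pvC2 from by decide])
      (by decide)
      (by intro e he
          rcases List.mem_append.mp he with hm | hm
          · rw [pvE_mem S0 pvP1 pvC1 e hm]; decide
          · rw [pvE_mem S0 pvP2 pvC2 e hm]; decide)
      (by intro he
          rcases List.mem_append.mp he with hm | hm
          · exact absurd (pvE_mem S0 pvP1 pvC1 pvP3 hm) (by decide)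
          · exact absurd (pvE_mem S0 pvP2 pvC2 pvP3 hm) (by decide))
    rw [h]
    simp only [List.append_assoc]
  rw [s3]
  congr 1
  apply List.filter_congr
  intro x _
  exact pv_bool3 _ _ _ _ _ _

-- ===== B side =====

-- the collapsed set in literal shape
def pvCollapsedL (S : List String) : List String :=
  (if pvB S pvP1 pvC1 then [pvP1] else []) ++
    ((if pvB S pvP2 pvC2 then [pvP2] else []) ++ (if pvB S pvP3 pvC3 then [pvP3] else []))

lemma pv_collapsed_eq (S : List String) :
    PySem.Set.ofList
      ((pvGroups.filter
          (fun pc => PySem.Set.contains S pc.1 || PySem.Set.issuperset S pc.2)).map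
        (fun pc => pc.1)) = pvCollapsedL S := by
  rw [show (fun pc : String × List String =>
        PySem.Set.contains S pc.1 || PySem.Set.issuperset S pc.2) =
      (fun pc : String × List String => pvB S pc.1 pc.2) from rfl]
  cases hb1 : pvB S pvP1 pvC1 <;> cases hb2 : pvB S pvP2 pvC2 <;> cases hb3 : pvB S pvP3 pvC3 <;>
  · simp only [pvP1, pvC1] at hb1
    simp only [pvP2, pvC2] at hb2
    simp only [pvP3, pvC3] at hb3
    simp [pvGroups, pvCollapsedL, pvP1, pvP2, pvP3, pvC1, pvC2, pvC3, hb1, hb2, hb3]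
    all_goals decide

lemma pv_collapsedL_nodup (S : List String) : (pvCollapsedL S).Nodup := by
  unfold pvCollapsedL
  cases hb1 : pvB S pvP1 pvC1 <;> cases hb2 : pvB S pvP2 pvC2 <;> cases hb3 : pvB S pvP3 pvC3 <;>
    decide

lemma pv_collapsed_contains_1 (S : List String) :
    (pvCollapsedL S).contains pvP1 = pvB S pvP1 pvC1 := by
  unfold pvCollapsedL
  cases hb1 : pvB S pvP1 pvC1 <;> cases hb2 : pvB S pvP2 pvC2 <;> cases hb3 : pvB S pvP3 pvC3 <;>
    decide

lemma pv_collapsed_contains_2 (S : List String) :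
    (pvCollapsedL S).contains pvP2 = pvB S pvP2 pvC2 := by
  unfold pvCollapsedL
  cases hb1 : pvB S pvP1 pvC1 <;> cases hb2 : pvB S pvP2 pvC2 <;> cases hb3 : pvB S pvP3 pvC3 <;>
    decide

lemma pv_collapsed_contains_3 (S : List String) :
    (pvCollapsedL S).contains pvP3 = pvB S pvP3 pvC3 := by
  unfold pvCollapsedL
  cases hb1 : pvB S pvP1 pvC1 <;> cases hb2 : pvB S pvP2 pvC2 <;> cases hb3 : pvB S pvP3 pvC3 <;>
    decide

lemma pv_collapsed_mem_1 (S : List String) :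
    pvP1 ∈ pvCollapsedL S ↔ pvB S pvP1 pvC1 = true := by
  have h := pv_collapsed_contains_1 S
  rw [pv_contains_eq] at h
  constructor
  · intro hm; rw [← h]; exact decide_eq_true hm
  · intro hb; rw [hb] at h; exact of_decide_eq_true h

lemma pv_collapsed_mem_2 (S : List String) :
    pvP2 ∈ pvCollapsedL S ↔ pvB S pvP2 pvC2 = true := by
  have h := pv_collapsed_contains_2 S
  rw [pv_contains_eq] at h
  constructor
  · intro hm; rw [← h]; exact decide_eq_true hm
  · intro hb; rw [hb] at h; exact of_decide_eq_true h

lemma pv_collapsed_mem_3 (S : List String) :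
    pvP3 ∈ pvCollapsedL S ↔ pvB S pvP3 pvC3 = true := by
  have h := pv_collapsed_contains_3 S
  rw [pv_contains_eq] at h
  constructor
  · intro hm; rw [← h]; exact decide_eq_true hm
  · intro hb; rw [hb] at h; exact of_decide_eq_true h

-- what CHILD_TO_PARENT.get returns
lemma pv_get_child (x : String) :
    PySem.Dict.get? pvChildToParent x =
      if pvC1.contains x then some pvP1
      else if pvC2.contains x then some pvP2
      else if pvC3.contains x then some pvP3
      else none := by
  by_cases h1 : x ∈ pvC1
  · simp only [pvC1, List.mem_cons, List.not_mem_nil, or_false] at h1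
    rcases h1 with rfl | rfl | rfl | rfl | rfl | rfl | rfl <;> decide
  · by_cases h2 : x ∈ pvC2
    · simp only [pvC2, List.mem_cons, List.not_mem_nil, or_false] at h2
      rcases h2 with rfl | rfl | rfl | rfl | rfl | rfl | rfl | rfl | rfl <;> decide
    · by_cases h3 : x ∈ pvC3
      · simp only [pvC3, List.mem_cons, List.not_mem_nil, or_false] at h3
        rcases h3 with rfl | rfl | rfl | rfl | rfl | rfl | rfl <;> decide
      · have hn1 : pvC1.contains x = false := by simp [pv_contains_eq, h1]
        have hn2 : pvC2.contains x = false := by simp [pv_contains_eq, h2]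
        have hn3 : pvC3.contains x = false := by simp [pv_contains_eq, h3]
        rw [hn1, hn2, hn3]
        simp only [Bool.false_eq_true, if_false]
        have hk : x ∉ PySem.Dict.keys pvChildToParent := by
          have hke : PySem.Dict.keys pvChildToParent = pvC1 ++ pvC2 ++ pvC3 := by decide
          rw [hke]
          simp [List.mem_append, h1, h2, h3]
        rw [PySem.Dict.get?_eq_none_iff_not_mem_keys]
        exact hk

-- the kept-filter predicate of B equals pvKeep pointwise
lemma pv_kf_eq_keep (S : List String) (x : String) :
    (!((PySem.Dict.get? pvChildToParent x).any
        (fun p => PySem.Set.contains (pvCollapsedL S) p))) = pvKeep S x := by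
  rw [pv_get_child]
  by_cases h1 : x ∈ pvC1
  · simp [h1, pv_nin_c1_c2 x h1, pv_nin_c1_c3 x h1, pv_collapsed_mem_1, pvKeep,
      pv_set_contains_eq, pv_contains_eq]
  · by_cases h2 : x ∈ pvC2
    · simp [h1, h2, pv_nin_c2_c1 x h2, pv_nin_c2_c3 x h2, pv_collapsed_mem_2, pvKeep,
        pv_set_contains_eq, pv_contains_eq]
    · by_cases h3 : x ∈ pvC3
      · simp [h1, h2, h3, pv_nin_c3_c1 x h3, pv_nin_c3_c2 x h3, pv_collapsed_mem_3, pvKeep,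
          pv_set_contains_eq, pv_contains_eq]
      · simp [h1, h2, h3, pvKeep, pv_contains_eq]

-- the kept set of B is the filtered original selection
lemma pv_kept_eq (sv : List String) :
    PySem.Set.ofList ((PySem.Set.ofList sv).filter (fun x =>
        !((PySem.Dict.get? pvChildToParent x).any
          (fun p => PySem.Set.contains (pvCollapsedL (PySem.Set.ofList sv)) p)))) =
      (PySem.Set.ofList sv).filter (pvKeep (PySem.Set.ofList sv)) := by
  rw [List.filter_congr (fun x _ => pv_kf_eq_keep (PySem.Set.ofList sv) x)]
  exact PySem.Set.ofList_eq_self_of_nodup _ ((PySem.Set.nodup_ofList sv).filter _)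

lemma pv_keep_parent (S : List String) (p : String)
    (h1 : p ∉ pvC1) (h2 : p ∉ pvC2) (h3 : p ∉ pvC3) :
    pvKeep S p = true := by
  simp [pvKeep, pv_contains_eq, h1, h2, h3]

-- one component of the union's tail
lemma pv_tail_comp (S : List String) (b : Bool) (p : String)
    (hk : pvKeep S p = true) :
    (if b then [p] else []).filter
        (fun x => !(PySem.Set.contains (S.filter (pvKeep S)) x)) =
      (if b && !S.contains p then [p] else []) := by
  cases b
  · simp
  · by_cases hs : p ∈ S <;> simp [pv_set_contains_eq, pv_contains_eq, hk, hs]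

lemma pv_tail (S : List String) :
    (pvCollapsedL S).filter (fun x => !(PySem.Set.contains (S.filter (pvKeep S)) x)) =
      pvE S pvP1 pvC1 ++ (pvE S pvP2 pvC2 ++ pvE S pvP3 pvC3) := by
  unfold pvCollapsedL pvE
  rw [List.filter_append, List.filter_append]
  rw [pv_tail_comp S _ pvP1 (pv_keep_parent S pvP1 (by decide) (by decide) (by decide)),
      pv_tail_comp S _ pvP2 (pv_keep_parent S pvP2 (by decide) (by decide) (by decide)),
      pv_tail_comp S _ pvP3 (pv_keep_parent S pvP3 (by decide) (by decide) (by decide))]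

-- ===== VERDICT (by name: the statement is the Claim_ definition above) =====
theorem effective_service_selection_py_spec : Claim_equal_effective_service_selection_py := by
  intro sv _
  unfold Spec_effective_service_selection_py
  rw [pvA_char]
  simp only [effective_service_selection_py_alt]
  rw [pv_collapsed_eq, pv_kept_eq]
  rw [show ∀ a b : List String, PySem.Set.union a b = PySem.Set.update a b from fun a b => rfl]
  rw [PySem.Set.update_eq_append_filter]
  rw [PySem.Set.ofList_eq_self_of_nodup (pvCollapsedL (PySem.Set.ofList sv))
        (pv_collapsedL_nodup (PySem.Set.ofList sv))]
  rw [pv_tail]
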